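-- pv_equiv track=rewrite | github.com/alan-turing-institute/advent-of-code-2024 | day-20/python_crangelsmith/day20.py | move_position
-- ===== SOURCE A (Python) =====
-- def move_position(start_pos, moves):
--     """Move through the trail based on a sequence of moves."""
--     y, x = start_pos
--     path_positions = []
--
--     for move in moves:
--         if move == "L":
--             x -= 1
--         elif move == "R":
--             x += 1
--         elif move == "U":
--             y -= 1
--         elif move == "D":
--             y += 1
--         path_positions.append((y, x))
--
--     return (y, x), path_positions
-- ===== SOURCE B (Python) =====
-- def _scan(a, ds):
--     """Running sums of ds seeded with a: [a, a+d0, a+d0+d1, ...]."""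
--     out = [a]
--     for d in ds:
--         a += d
--         out.append(a)
--     return out
--
--
-- def move_position(start_pos, moves):
--     """Move through the trail based on a sequence of moves."""
--     DELTA = {"L": (0, -1), "R": (0, 1), "U": (-1, 0), "D": (1, 0)}
--     deltas = [DELTA.get(m, (0, 0)) for m in moves]
--     ys = _scan(start_pos[0], [d[0] for d in deltas])
--     xs = _scan(start_pos[1], [d[1] for d in deltas])
--     path = list(zip(ys[1:], xs[1:]))
--     return (ys[-1], xs[-1]), path
-- ===== Notes on version B (the rewrite author's own statement) =====
-- stated objective: alternative
-- what changed: Replaces A's branching loop over mutable (y, x) state by a table lookup mapping each move to a (dy, dx) delta, two per-axis prefix-sum scans, and a zip assembling the path.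
import Mathlib
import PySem

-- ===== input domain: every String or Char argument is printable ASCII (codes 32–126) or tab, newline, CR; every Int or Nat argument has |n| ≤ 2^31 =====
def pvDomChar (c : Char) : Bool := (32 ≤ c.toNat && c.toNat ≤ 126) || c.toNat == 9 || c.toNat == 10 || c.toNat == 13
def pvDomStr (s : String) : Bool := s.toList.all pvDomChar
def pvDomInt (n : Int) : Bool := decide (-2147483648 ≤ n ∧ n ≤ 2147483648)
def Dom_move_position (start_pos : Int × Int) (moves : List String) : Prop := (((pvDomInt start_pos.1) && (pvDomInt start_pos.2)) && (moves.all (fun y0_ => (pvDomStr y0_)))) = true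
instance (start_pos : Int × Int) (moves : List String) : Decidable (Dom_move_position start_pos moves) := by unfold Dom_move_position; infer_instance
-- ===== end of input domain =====

-- B replaces A's branching loop over mutable (y, x) state by a delta table, two
-- per-axis prefix-sum scans and a zip assembling the path (objective: alternative).


-- ===== PORT A =====
-- literal transliteration of A: a fold over (y, x, path_positions), branch chain in order
def move_position (start_pos : Int × Int) (moves : List String) : (Int × Int) × (List (Int × Int)) :=
  let res := moves.foldl
    (fun (st : Int × Int × List (Int × Int)) move =>
      let y := st.1
      let x := st.2.1
      let yx :=
        if move = "L" then (y, x - 1)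
        else if move = "R" then (y, x + 1)
        else if move = "U" then (y - 1, x)
        else if move = "D" then (y + 1, x)
        else (y, x)
      (yx.1, yx.2, st.2.2 ++ [(yx.1, yx.2)]))
    (start_pos.1, start_pos.2, ([] : List (Int × Int)))
  ((res.1, res.2.1), res.2.2)

-- ===== PORT B =====
-- B's delta table (dict.get with default (0, 0))
def mv_delta (m : String) : Int × Int :=
  (PySem.Dict.ofList [("L", ((0 : Int), (-1 : Int))), ("R", (0, 1)), ("U", (-1, 0)), ("D", (1, 0))]).getD m (0, 0)

-- B's _scan helper: running sums seeded with a
def mv_scan (a : Int) : List Int → List Int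
  | [] => [a]
  | d :: ds => a :: mv_scan (a + d) ds

def move_position_alt (start_pos : Int × Int) (moves : List String) : (Int × Int) × (List (Int × Int)) :=
  let deltas := moves.map mv_delta
  let ys := mv_scan start_pos.1 (deltas.map (fun d => d.1))
  let xs := mv_scan start_pos.2 (deltas.map (fun d => d.2))
  let path := List.zip (ys.drop 1) (xs.drop 1)
  ((ys.getLast!, xs.getLast!), path)

-- ===== PRECONDITION & SPEC =====
def Spec_move_position (start_pos : Int × Int) (moves : List String) (out : (Int × Int) × (List (Int × Int))) : Prop := out = move_position_alt start_pos moves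
instance (start_pos : Int × Int) (moves : List String) (out : (Int × Int) × (List (Int × Int))) : Decidable (Spec_move_position start_pos moves out) := by unfold Spec_move_position; infer_instance

-- ===== CLAIM (what is proved, stated in full; the proofs are below) =====
def Claim_equal_move_position : Prop := ∀ (start_pos : Int × Int) (moves : List String), Dom_move_position start_pos moves → Spec_move_position start_pos moves (move_position start_pos moves)

-- ===== LEMMAS AND PROOFS =====

theorem mv_scan_ne_nil (a : Int) (ds : List Int) : mv_scan a ds ≠ [] := by
  cases ds <;> simp [mv_scan]

theorem getLast!_cons_scan (b a : Int) (ds : List Int) :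
    (b :: mv_scan a ds).getLast! = (mv_scan a ds).getLast! := by
  have h := mv_scan_ne_nil a ds
  cases hds : mv_scan a ds with
  | nil => exact absurd hds h
  | cons c cs => simp [List.getLast!, List.getLast]

-- A's branch chain computes exactly the delta-table step
theorem mv_delta_L : mv_delta "L" = (0, -1) := by decide
theorem mv_delta_R : mv_delta "R" = (0, 1) := by decide
theorem mv_delta_U : mv_delta "U" = (-1, 0) := by decide
theorem mv_delta_D : mv_delta "D" = (1, 0) := by decide

theorem mv_delta_items :
    (PySem.Dict.ofList [("L", ((0 : Int), (-1 : Int))), ("R", (0, 1)), ("U", (-1, 0)), ("D", (1, 0))]).items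
      = [("L", ((0 : Int), (-1 : Int))), ("R", (0, 1)), ("U", (-1, 0)), ("D", (1, 0))] := by decide

theorem mv_delta_other (m : String) (h1 : m ≠ "L") (h2 : m ≠ "R") (h3 : m ≠ "U") (h4 : m ≠ "D") :
    mv_delta m = (0, 0) := by
  unfold mv_delta
  rw [PySem.Dict.getD, PySem.Dict.get?, mv_delta_items]
  have e1 : (("L" : String) == m) = false := by simp [Ne.symm h1]
  have e2 : (("R" : String) == m) = false := by simp [Ne.symm h2]
  have e3 : (("U" : String) == m) = false := by simp [Ne.symm h3]
  have e4 : (("D" : String) == m) = false := by simp [Ne.symm h4]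
  simp [List.find?, e1, e2, e3, e4]

theorem step_eq_delta (m : String) (y x : Int) :
    (if m = "L" then (y, x - 1)
     else if m = "R" then (y, x + 1)
     else if m = "U" then (y - 1, x)
     else if m = "D" then (y + 1, x)
     else (y, x)) = (y + (mv_delta m).1, x + (mv_delta m).2) := by
  by_cases h1 : m = "L"
  · simp [h1, mv_delta_L]; omega
  · by_cases h2 : m = "R"
    · simp [h2, mv_delta_R]
    · by_cases h3 : m = "U"
      · simp [h3, mv_delta_U]; omega
      · by_cases h4 : m = "D"
        · simp [h4, mv_delta_D]
        · simp [h1, h2, h3, h4, mv_delta_other m h1 h2 h3 h4]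

-- main loop invariant: A's fold from (y, x, p) equals B's scans seeded at (y, x),
-- with the path appended to p
theorem loop_eq (ms : List String) : ∀ (y x : Int) (p : List (Int × Int)),
    ms.foldl
      (fun (st : Int × Int × List (Int × Int)) move =>
        let y := st.1
        let x := st.2.1
        let yx :=
          if move = "L" then (y, x - 1)
          else if move = "R" then (y, x + 1)
          else if move = "U" then (y - 1, x)
          else if move = "D" then (y + 1, x)
          else (y, x)
        (yx.1, yx.2, st.2.2 ++ [(yx.1, yx.2)]))
      (y, x, p)
    = ((mv_scan y ((ms.map mv_delta).map (fun d => d.1))).getLast!,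
       (mv_scan x ((ms.map mv_delta).map (fun d => d.2))).getLast!,
       p ++ List.zip ((mv_scan y ((ms.map mv_delta).map (fun d => d.1))).drop 1)
                     ((mv_scan x ((ms.map mv_delta).map (fun d => d.2))).drop 1)) := by
  induction ms with
  | nil => intro y x p; simp [mv_scan, List.getLast!]
  | cons m ms ih =>
    intro y x p
    simp only [List.foldl_cons, List.map_cons, mv_scan]
    rw [step_eq_delta m y x]
    rw [ih (y + (mv_delta m).1) (x + (mv_delta m).2) (p ++ [(y + (mv_delta m).1, x + (mv_delta m).2)])]
    rw [getLast!_cons_scan, getLast!_cons_scan]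
    simp only [List.drop_one, List.tail_cons]
    cases hy : mv_scan (y + (mv_delta m).1) ((ms.map mv_delta).map (fun d => d.1)) with
    | nil => exact absurd hy (mv_scan_ne_nil _ _)
    | cons c cs =>
      cases hx : mv_scan (x + (mv_delta m).2) ((ms.map mv_delta).map (fun d => d.2)) with
      | nil => exact absurd hx (mv_scan_ne_nil _ _)
      | cons e es =>
        have hc : c = y + (mv_delta m).1 := by
          cases hds : (ms.map mv_delta).map (fun d => d.1) <;> rw [hds] at hy <;>
            simp [mv_scan] at hy <;> omega
        have he : e = x + (mv_delta m).2 := by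
          cases hds : (ms.map mv_delta).map (fun d => d.2) <;> rw [hds] at hx <;>
            simp [mv_scan] at hx <;> omega
        subst hc he
        simp [List.zip]

-- ===== VERDICT (by name: the statement is the Claim_ definition above) =====
theorem move_position_spec : Claim_equal_move_position := by
  intro start_pos moves _
  show _ = move_position_alt start_pos moves
  unfold move_position move_position_alt
  rw [loop_eq moves start_pos.1 start_pos.2 []]
  simp
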